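-- pv_equiv track=rewrite | github.com/coizioc/advent-of-code | py/year2023/day06.py | get_ways_to_win
-- ===== SOURCE A (Python) =====
-- import functools
-- import operator
--
-- def get_ways_to_win(times, distances):
--     ways_to_win= []
--
--     for time, record in zip(times, distances):
--         num_ways_to_win = 0
--         for i in range(time):
--             if i * (time - i) > record:
--                 num_ways_to_win += 1
--         ways_to_win.append(num_ways_to_win)
--
--     return functools.reduce(operator.mul, ways_to_win)
-- ===== SOURCE B (Python) =====
-- def _least_winner(t, r, lo, hi):
--     # binary search: least a in [lo, hi] with a*(t-a) > r,
--     # given the predicate is upward-closed on [lo, hi] and holds at hi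
--     while lo < hi:
--         mid = (lo + hi) // 2
--         if mid * (t - mid) > r:
--             hi = mid
--         else:
--             lo = mid + 1
--     return lo
--
-- def _count_wins(t, r):
--     if t <= 0:
--         return 0
--     if r < 0:
--         return t
--     m = t // 2
--     if m * (t - m) <= r:
--         return 0
--     a = _least_winner(t, r, 1, m)
--     return t - 2 * a + 1
--
-- def get_ways_to_win(times, distances):
--     prod = 1
--     for t, r in zip(times, distances):
--         prod *= _count_wins(t, r)
--     return prod
-- ===== Notes on version B (the rewrite author's own statement) =====
-- stated objective: faster
-- what changed: Per race, the O(time) scan over all hold values is replaced by a binary search on the symmetric parabola for the least winning hold, giving the count in closed form t-2a+1; the product is accumulated directly instead of building a list and reducing it.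
import Mathlib
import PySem

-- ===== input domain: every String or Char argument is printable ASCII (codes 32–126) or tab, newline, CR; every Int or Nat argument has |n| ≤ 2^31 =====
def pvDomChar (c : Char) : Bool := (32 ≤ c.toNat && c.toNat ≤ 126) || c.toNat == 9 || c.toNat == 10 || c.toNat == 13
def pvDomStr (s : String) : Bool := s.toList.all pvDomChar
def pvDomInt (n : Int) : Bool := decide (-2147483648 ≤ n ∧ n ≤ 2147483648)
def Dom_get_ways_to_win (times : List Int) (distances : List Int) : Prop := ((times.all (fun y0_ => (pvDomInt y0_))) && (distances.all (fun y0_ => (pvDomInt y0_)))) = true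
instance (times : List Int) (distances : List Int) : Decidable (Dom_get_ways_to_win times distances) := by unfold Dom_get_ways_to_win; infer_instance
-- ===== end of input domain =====

-- B replaces A's O(time) scan per race by a binary search for the least winning
-- hold (count t-2a+1) and accumulates the product directly: asymptotically faster.
-- ===== PORT A =====
-- functools.reduce(operator.mul, l): first element is the initial accumulator;
-- Python raises TypeError on [], which Pre_ excludes ([] => 0 is unreachable there).
def pyReduceMul (l : List Int) : Int :=
  match l with
  | [] => 0
  | x :: xs => xs.foldl (fun a b => a * b) x

def get_ways_to_win (times : List Int) (distances : List Int) : Int :=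
  let ways := (times.zip distances).foldl
    (fun acc p =>
      acc ++ [(PySem.List.pyRange 0 p.1 1).foldl
        (fun n i => if i * (p.1 - i) > p.2 then n + 1 else n) 0]) []
  pyReduceMul ways

-- ===== PORT B =====
def leastWinner (t r lo hi : Int) : Int :=
  if h : lo < hi then
    let mid := PySem.Int.floordiv (lo + hi) 2
    if mid * (t - mid) > r then leastWinner t r lo mid
    else leastWinner t r (mid + 1) hi
  else lo
termination_by (hi - lo).toNat
decreasing_by
  · have := PySem.Int.floordiv_two_mid_bounds (le_of_lt h)
    have hlt : PySem.Int.floordiv (lo + hi) 2 < hi := by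
      have := PySem.Int.floordiv_lt_iff_lt_mul (a := lo + hi) (b := 2) (q := hi) (by omega)
      omega
    omega
  · have := PySem.Int.floordiv_two_mid_bounds (le_of_lt h)
    omega

def countWins (t r : Int) : Int :=
  if t ≤ 0 then 0
  else if r < 0 then t
  else
    let m := PySem.Int.floordiv t 2
    if m * (t - m) ≤ r then 0
    else t - 2 * leastWinner t r 1 m + 1

def get_ways_to_win_alt (times : List Int) (distances : List Int) : Int :=
  (times.zip distances).foldl (fun prod p => prod * countWins p.1 p.2) 1

-- ===== PRECONDITION & SPEC =====
-- Pre_ excludes exactly the inputs where functools.reduce raises TypeError: an empty race list.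
def Pre_get_ways_to_win (times : List Int) (distances : List Int) : Prop :=
  times ≠ [] ∧ distances ≠ []
instance (times : List Int) (distances : List Int) : Decidable (Pre_get_ways_to_win times distances) := by unfold Pre_get_ways_to_win; infer_instance
def pvWitness_get_ways_to_win : List Int × List Int := ([7, 15], [9, 40])

def Spec_get_ways_to_win (times : List Int) (distances : List Int) (out : Int) : Prop := out = get_ways_to_win_alt times distances
instance (times : List Int) (distances : List Int) (out : Int) : Decidable (Spec_get_ways_to_win times distances out) := by unfold Spec_get_ways_to_win; infer_instance

-- ===== CLAIM (what is proved, stated in full; the proofs are below) =====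
def Claim_equal_get_ways_to_win : Prop := ∀ (times : List Int) (distances : List Int), Dom_get_ways_to_win times distances → Pre_get_ways_to_win times distances → Spec_get_ways_to_win times distances (get_ways_to_win times distances)

-- ===== LEMMAS AND PROOFS =====

-- A's inner loop for one race
def countA (t r : Int) : Int :=
  (PySem.List.pyRange 0 t 1).foldl (fun n i => if i * (t - i) > r then n + 1 else n) 0

-- the winning predicate for one race
def winB (t r i : Int) : Bool := decide (i * (t - i) > r)

theorem countA_eq_countP (t r : Int) :
    countA t r = ((PySem.List.pyRange 0 t 1).countP (winB t r) : Int) := by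
  unfold countA winB
  rw [PySem.List.foldl_ite_add_one]
  simp

theorem win_mono (t r i j : Int) (hij : i ≤ j) (hsum : i + j ≤ t)
    (hi : winB t r i = true) : winB t r j = true := by
  unfold winB at *
  simp only [decide_eq_true_eq] at *
  nlinarith [mul_nonneg (by omega : (0:Int) ≤ j - i) (by omega : (0:Int) ≤ t - i - j)]

theorem leastWinner_spec (t r : Int) (lo hi : Int) (hle : lo ≤ hi)
    (hwin : winB t r hi = true)
    (hmono : ∀ i j : Int, lo ≤ i → i ≤ j → j ≤ hi → winB t r i = true → winB t r j = true) :
    lo ≤ leastWinner t r lo hi ∧ leastWinner t r lo hi ≤ hi ∧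
      winB t r (leastWinner t r lo hi) = true ∧
      ∀ i : Int, lo ≤ i → i < leastWinner t r lo hi → winB t r i = false := by
  generalize hn : (hi - lo).toNat = n
  induction n using Nat.strong_induction_on generalizing lo hi with
  | _ n ih =>
    rw [leastWinner]
    by_cases h : lo < hi
    · simp only [h, dif_pos]
      have hmid := PySem.Int.floordiv_two_mid_bounds (le_of_lt h)
      set mid := PySem.Int.floordiv (lo + hi) 2 with hmiddef
      have hmidlt : mid < hi := by
        have := PySem.Int.floordiv_lt_iff_lt_mul (a := lo + hi) (b := 2) (q := hi)
          (by omega)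
        omega
      by_cases hw : mid * (t - mid) > r
      · simp only [hw, if_pos]
        have hwm : winB t r mid = true := by unfold winB; simpa using hw
        have hrec := ih ((mid - lo).toNat) (by omega) lo mid (by omega) hwm
          (fun i j h1 h2 h3 h4 => hmono i j h1 h2 (by omega) h4) rfl
        exact ⟨hrec.1, by omega, hrec.2.2.1, hrec.2.2.2⟩
      · simp only [hw, if_neg, not_false_eq_true]
        have hwm : winB t r mid = false := by
          unfold winB; simpa using hw
        have hrec := ih ((hi - (mid + 1)).toNat) (by omega) (mid + 1) hi (by omega) hwin
          (fun i j h1 h2 h3 h4 => hmono i j (by omega) h2 h3 h4) rfl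
        refine ⟨by omega, hrec.2.1, hrec.2.2.1, ?_⟩
        intro i h1 h2
        by_cases hi2 : i ≤ mid
        · by_contra hc
          have : winB t r mid = true :=
            hmono i mid h1 hi2 (by omega) (by simpa using hc)
          simp [this] at hwm
        · exact hrec.2.2.2 i (by omega) h2
    · simp only [h, dif_neg, not_false_eq_true]
      have : lo = hi := by omega
      subst this
      exact ⟨le_refl _, le_refl _, hwin, fun i h1 h2 => absurd h2 (by omega)⟩

theorem countA_eq_countWins (t r : Int) : countA t r = countWins t r := by
  rw [countA_eq_countP]
  unfold countWins
  by_cases ht : t ≤ 0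
  · rw [PySem.List.pyRange_one_eq_nil (by omega)]
    simp [ht]
  · simp only [ht, if_neg, not_false_eq_true]
    by_cases hr : r < 0
    · -- every i in [0, t) wins
      simp only [hr, if_pos]
      have hall : ∀ i ∈ PySem.List.pyRange 0 t 1, winB t r i = true := by
        intro i hi
        rw [PySem.List.mem_pyRange_one] at hi
        unfold winB
        simp only [decide_eq_true_eq]
        nlinarith [mul_nonneg (by omega : (0:Int) ≤ i) (by omega : (0:Int) ≤ t - i)]
      rw [List.countP_eq_length.mpr hall, PySem.List.length_pyRange_one]
      omega
    · simp only [hr, if_neg, not_false_eq_true]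
      have hm : PySem.Int.floordiv t 2 = t / 2 :=
        PySem.Int.floordiv_eq_ediv_of_pos (by norm_num)
      set m := PySem.Int.floordiv t 2 with hmdef
      have hm2 : 2 * m ≤ t ∧ t ≤ 2 * m + 1 := by omega
      -- any winner below t yields a winner ≤ m
      have hup : ∀ i : Int, 0 ≤ i → i < t → winB t r i = true → winB t r m = true := by
        intro i h0 hlt hw
        by_cases him : i ≤ m
        · exact win_mono t r i m him (by omega) hw
        · have hw' : winB t r (t - i) = true := by
            unfold winB at *
            simp only [decide_eq_true_eq] at *
            nlinarith
          exact win_mono t r (t - i) m (by omega) (by omega) hw'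
      by_cases hnw : m * (t - m) ≤ r
      · simp only [hnw, if_pos]
        have : ∀ i ∈ PySem.List.pyRange 0 t 1, ¬ (winB t r i = true) := by
          intro i hi hw
          rw [PySem.List.mem_pyRange_one] at hi
          have := hup i hi.1 hi.2 hw
          unfold winB at this
          simp only [decide_eq_true_eq] at this
          omega
        simp [List.countP_eq_zero.mpr this]
      · simp only [hnw, if_neg, not_false_eq_true]
        push Not at hnw hr
        have hwm : winB t r m = true := by unfold winB; simpa using hnw
        have hm1 : 1 ≤ m := by
          by_contra hc
          have hm0 : m = 0 := by omega
          rw [hm0, zero_mul] at hnw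
          omega
        have hspec := leastWinner_spec t r 1 m hm1 hwm
          (fun i j h1 h2 h3 h4 => win_mono t r i j h2 (by omega) h4)
        set a := leastWinner t r 1 m with hadef
        obtain ⟨ha1, ham, hwa, hmin⟩ := hspec
        have hw0 : winB t r 0 = false := by
          unfold winB; simp only [decide_eq_false_iff_not, not_lt]
          omega
        -- characterization: for 0 ≤ i < t, win i ↔ a ≤ i ∧ i ≤ t - a
        have hchar : ∀ i : Int, 0 ≤ i → i < t →
            (winB t r i = (decide (a ≤ i ∧ i ≤ t - a))) := by
          intro i h0 hlt
          by_cases hw : winB t r i = true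
          · rw [hw]
            have hi1 : 1 ≤ i := by
              rcases lt_or_ge i 1 with h1 | h1
              · exfalso; have : i = 0 := by omega
                rw [this, hw0] at hw; exact absurd hw (by simp)
              · exact h1
            have hai : a ≤ i := by
              by_contra hc
              push Not at hc
              have h5 := hmin i hi1 hc
              rw [h5] at hw
              exact Bool.false_ne_true hw
            have hw' : winB t r (t - i) = true := by
              unfold winB at *
              simp only [decide_eq_true_eq] at *
              nlinarith
            have hati : a ≤ t - i := by
              by_contra hc
              push Not at hc
              have h5 := hmin (t - i) (by omega) hc
              rw [h5] at hw'
              exact Bool.false_ne_true hw'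
            symm
            simp only [decide_eq_true_eq]
            exact ⟨hai, by omega⟩
          · rw [eq_false_of_ne_true hw]
            symm
            simp only [decide_eq_false_iff_not, not_and, not_le]
            intro hai
            by_contra hc
            push Not at hc
            -- a ≤ i ≤ t - a ⇒ win i
            have hwa' : winB t r i = true := by
              unfold winB at *
              simp only [decide_eq_true_eq] at *
              nlinarith [mul_nonneg (by omega : (0:Int) ≤ i - a)
                (by omega : (0:Int) ≤ t - a - i)]
            simp [hwa'] at hw
        have hcong : (PySem.List.pyRange 0 t 1).countP (winB t r) =
            (PySem.List.pyRange 0 t 1).countP (fun i => decide (a ≤ i ∧ i ≤ t - a)) := by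
          apply List.countP_congr
          intro i hi
          rw [PySem.List.mem_pyRange_one] at hi
          rw [hchar i hi.1 hi.2]
        rw [hcong]
        have hsplit : PySem.List.pyRange 0 t 1 =
            PySem.List.pyRange 0 a 1 ++ PySem.List.pyRange a (t - a + 1) 1 ++
              PySem.List.pyRange (t - a + 1) t 1 := by
          rw [← PySem.List.pyRange_one_append 0 a (t - a + 1) (by omega) (by omega),
            ← PySem.List.pyRange_one_append 0 (t - a + 1) t (by omega) (by omega)]
        rw [hsplit]
        rw [List.countP_append, List.countP_append]
        have h1 : (PySem.List.pyRange 0 a 1).countP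
            (fun i => decide (a ≤ i ∧ i ≤ t - a)) = 0 := by
          apply List.countP_eq_zero.mpr
          intro i hi
          rw [PySem.List.mem_pyRange_one] at hi
          simp only [decide_eq_true_eq, not_and, not_le]
          intro; omega
        have h2 : (PySem.List.pyRange (t - a + 1) t 1).countP
            (fun i => decide (a ≤ i ∧ i ≤ t - a)) = 0 := by
          apply List.countP_eq_zero.mpr
          intro i hi
          rw [PySem.List.mem_pyRange_one] at hi
          simp only [decide_eq_true_eq, not_and, not_le]
          intro; omega
        have h3 : (PySem.List.pyRange a (t - a + 1) 1).countP
            (fun i => decide (a ≤ i ∧ i ≤ t - a)) =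
            (PySem.List.pyRange a (t - a + 1) 1).length := by
          apply List.countP_eq_length.mpr
          intro i hi
          rw [PySem.List.mem_pyRange_one] at hi
          simp only [decide_eq_true_eq]
          omega
        rw [h1, h2, h3, PySem.List.length_pyRange_one]
        omega

theorem zip_ne_nil {α β : Type} (xs : List α) (ys : List β)
    (hx : xs ≠ []) (hy : ys ≠ []) : xs.zip ys ≠ [] := by
  cases xs with
  | nil => exact absurd rfl hx
  | cons x xs' =>
    cases ys with
    | nil => exact absurd rfl hy
    | cons y ys' => simp [List.zip]

-- ===== VERDICT (by name: the statements are the Claim_ definitions above) =====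
theorem get_ways_to_win_spec : Claim_equal_get_ways_to_win := by
  intro times distances _ hpre
  unfold Spec_get_ways_to_win get_ways_to_win get_ways_to_win_alt
  rw [PySem.List.foldl_append_singleton_eq_map]
  have hmap : (times.zip distances).map
      (fun p : Int × Int => (PySem.List.pyRange 0 p.1 1).foldl
        (fun n i => if i * (p.1 - i) > p.2 then n + 1 else n) 0) =
      (times.zip distances).map (fun p : Int × Int => countWins p.1 p.2) := by
    apply List.map_congr_left
    intro p _
    exact countA_eq_countWins p.1 p.2
  rw [hmap]
  obtain ⟨p, l, hpl⟩ := List.exists_cons_of_ne_nil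
    (zip_ne_nil times distances hpre.1 hpre.2)
  rw [hpl]
  simp only [List.map_cons, List.nil_append, pyReduceMul, List.foldl_cons, one_mul]
  rw [List.foldl_map]
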